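-- pv_equiv track=rewrite | github.com/SantiagoAlvarezb/CS-Logic-Magic-Sqaure-Solver | Logic_Defenitions.py | formaClausal
-- ===== SOURCE A (Python) =====
-- def Clausula(C):
--     L = []
--     while len(C) > 0:
--         s = C[0]
--         if s == "O":
--             C = C[1:]
--         elif s == "-":
--             literal = s + C[1]
--             L.append(literal)
--             C = C[2:]
--         else:
--             L.append(s)
--             C = C[1:]
--     return L
--
-- def formaClausal(A):
--     L = []
--     i = 0
--     while len(A) > 0:
--         if i >= len(A):
--             L.append(Clausula(A))
--             A = []
--         else:
--             if A[i] == "Y":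
--                 L.append(Clausula(A[:i]))
--                 A = A[i + 1:]
--                 i = 0
--             else:
--                 i += 1
--     return L
-- ===== SOURCE B (Python) =====
-- def formaClausal(A):
--     # single pass over A: one traversal builds the clauses directly
--     res = []
--     cur = []
--     i = 0
--     n = len(A)
--     while i < n:
--         c = A[i]
--         if c == "Y":
--             res.append(cur)
--             cur = []
--             i += 1
--         elif c == "O":
--             i += 1
--         elif c == "-":
--             cur.append(A[i] + A[i + 1])
--             i += 2
--         else:
--             cur.append(c)
--             i += 1
--     if A and A[-1] != "Y":
--         res.append(cur)
--     return res
-- ===== Notes on version B (the rewrite author's own statement) =====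
-- stated objective: faster
-- what changed: Replaced A's two-phase scan (find each 'Y' by index, slice the segment off, re-tokenize it with Clausula which itself repeatedly slices the string) by a single index-based pass over the characters that builds the clause list directly, with no string slicing.
import Mathlib
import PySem

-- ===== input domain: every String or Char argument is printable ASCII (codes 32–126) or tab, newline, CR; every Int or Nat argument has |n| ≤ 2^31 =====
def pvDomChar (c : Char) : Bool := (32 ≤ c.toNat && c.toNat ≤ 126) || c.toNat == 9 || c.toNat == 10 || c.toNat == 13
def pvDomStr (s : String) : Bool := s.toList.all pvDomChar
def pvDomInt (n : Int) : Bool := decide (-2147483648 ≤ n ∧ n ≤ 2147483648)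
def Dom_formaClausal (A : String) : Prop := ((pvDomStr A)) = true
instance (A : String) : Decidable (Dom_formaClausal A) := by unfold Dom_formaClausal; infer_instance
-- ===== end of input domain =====

-- B replaces A's slice-and-retokenize two-phase scan by one linear pass over the characters
-- (measured faster on large inputs); equivalence is proved on Pre_, the inputs where A returns.

-- ===== PORT A =====
-- Python's Clausula over the characters of C; the `headD ' '` default is reachable only
-- where Python raises IndexError (a token '-' at the end of C), which Pre_ excludes.
def Clausula (C : List Char) : List String :=
  match C with
  | [] => []
  | c :: rest =>
    if c = 'O' then Clausula rest
    else if c = '-' then (String.mk [c, rest.headD ' ']) :: Clausula (rest.drop 1)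
    else (String.mk [c]) :: Clausula rest
termination_by C.length
decreasing_by all_goals (simp; try omega)

-- the while-loop of formaClausal: state (A, i, L)
def fcA (A : List Char) (i : Nat) (L : List (List String)) : List (List String) :=
  if A = [] then L
  else if i ≥ A.length then L ++ [Clausula A]
  else if A.getD i ' ' = 'Y' then fcA (A.drop (i + 1)) 0 (L ++ [Clausula (A.take i)])
  else fcA A (i + 1) L
termination_by 2 * A.length - i
decreasing_by all_goals simp [List.length_drop] at *; omega

def formaClausal (A : String) : List (List String) := fcA A.toList 0 []

-- ===== PORT B =====
-- the while-loop of Source B: one pass, `cur` is the clause under construction, `res` the finished ones;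
-- the `headD ' '` default is reachable only where Python raises IndexError (trailing '-'), excluded by Pre_.
def scanB (cs : List Char) (cur : List String) (res : List (List String)) :
    List (List String) × List String :=
  match cs with
  | [] => (res, cur)
  | c :: rest =>
    if c = 'Y' then scanB rest [] (res ++ [cur])
    else if c = 'O' then scanB rest cur res
    else if c = '-' then scanB (rest.drop 1) (cur ++ [String.mk [c, rest.headD ' ']]) res
    else scanB rest (cur ++ [String.mk [c]]) res
termination_by cs.length
decreasing_by all_goals (simp; try omega)

def formaClausal_alt (A : String) : List (List String) :=
  let cs := A.toList
  let p := scanB cs [] []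
  if cs ≠ [] ∧ cs.getLastD ' ' ≠ 'Y' then p.1 ++ [p.2] else p.1

-- ===== PRECONDITION & SPEC =====
-- the 'Y'-separated segments of a character list (like Python's A.split('Y'))
def segsY : List Char → List (List Char)
  | [] => [[]]
  | c :: rest =>
    if c = 'Y' then [] :: segsY rest
    else (c :: (segsY rest).headD []) :: (segsY rest).tail

-- Pre_ excludes exactly the inputs where Python A raises IndexError: a 'Y'-separated
-- segment ending in an odd run of '-' makes Clausula read one character past the end.
def Pre_formaClausal (A : String) : Prop :=
  ∀ s ∈ segsY A.toList, Even ((s.reverse.takeWhile (fun c => c = '-')).length)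

instance (A : String) : Decidable (Pre_formaClausal A) := by
  unfold Pre_formaClausal; infer_instance

def pvWitness_formaClausal : String := "aY--Ob-cY"

def Spec_formaClausal (A : String) (out : List (List String)) : Prop := out = formaClausal_alt A
instance (A : String) (out : List (List String)) : Decidable (Spec_formaClausal A out) := by unfold Spec_formaClausal; infer_instance

-- ===== CLAIM (what is proved, stated in full; the proofs are below) =====
def Claim_equal_formaClausal : Prop := ∀ (A : String), Dom_formaClausal A → Pre_formaClausal A → Spec_formaClausal A (formaClausal A)

-- ===== LEMMAS AND PROOFS =====

-- "tokenizing s does not raise": structural form of the Pre_ condition on one segment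
def safeB : List Char → Bool
  | [] => true
  | c :: rest =>
    if c = '-' then
      match rest with
      | [] => false
      | _ :: rest' => safeB rest'
    else safeB rest

-- length of the trailing '-'-run
def dashRun (s : List Char) : Nat := (s.reverse.takeWhile (fun c => c = '-')).length

lemma takeWhile_append_all {α : Type} (p : α → Bool) (l₁ l₂ : List α)
    (h : l₁.all p = true) : (l₁ ++ l₂).takeWhile p = l₁ ++ l₂.takeWhile p := by
  induction l₁ with
  | nil => simp
  | cons a l ih =>
    simp only [List.all_cons, Bool.and_eq_true] at h
    simp [List.takeWhile_cons, h.1, ih h.2]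

lemma takeWhile_append_not_all {α : Type} (p : α → Bool) (l₁ l₂ : List α)
    (h : ¬ l₁.all p = true) : (l₁ ++ l₂).takeWhile p = l₁.takeWhile p := by
  induction l₁ with
  | nil => simp at h
  | cons a l ih =>
    by_cases hp : p a = true
    · simp only [List.all_cons, hp, Bool.true_and] at h
      simp [List.takeWhile_cons, hp, ih h]
    · simp [List.takeWhile_cons, hp]

lemma all_dash_reverse (s : List Char) :
    s.reverse.all (fun c => decide (c = '-')) = s.all (fun c => decide (c = '-')) := by
  simp [List.all_reverse]

lemma dashRun_cons (c : Char) (s : List Char) :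
    dashRun (c :: s) =
      if s.all (fun c => decide (c = '-')) = true then
        s.length + (if c = '-' then 1 else 0)
      else dashRun s := by
  unfold dashRun
  simp only [List.reverse_cons]
  by_cases h : s.all (fun c => decide (c = '-')) = true
  · rw [takeWhile_append_all _ _ _ (by rw [all_dash_reverse]; exact h)]
    simp only [h, if_true, List.length_append, List.length_reverse]
    by_cases hc : c = '-' <;> simp [List.takeWhile_cons, hc]
  · rw [takeWhile_append_not_all _ _ _ (by rw [all_dash_reverse]; exact h)]
    simp [h]

lemma dashRun_all (s : List Char) (h : s.all (fun c => decide (c = '-')) = true) :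
    dashRun s = s.length := by
  unfold dashRun
  have hs : s.reverse.takeWhile (fun c => c = '-') = s.reverse := by
    apply List.takeWhile_eq_self_iff.mpr
    intro a ha
    simpa using List.all_eq_true.mp h a (List.mem_reverse.mp ha)
  rw [hs, List.length_reverse]

lemma safeB_iff_even (s : List Char) : safeB s = true ↔ Even (dashRun s) := by
  induction s using safeB.induct with
  | case1 =>
    simp [safeB, dashRun]
  | case2 =>
    simp [safeB, dashRun, List.takeWhile]
  | case3 r rest' ih =>
    have h2 : safeB ('-' :: r :: rest') = safeB rest' := by simp [safeB]
    rw [h2, ih]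
    congr 1
    rw [dashRun_cons, dashRun_cons]
    by_cases hall : rest'.all (fun c => decide (c = '-')) = true
    · by_cases hr : r = '-'
      · subst hr
        have hall2 : (('-' :: rest').all (fun c => decide (c = '-'))) = true := by
          simp [hall]
        rw [if_pos hall2, if_pos rfl, List.length_cons, dashRun_all rest' hall]
        simp [Nat.even_add_one]
      · have hall2 : ¬ (((r :: rest').all (fun c => decide (c = '-'))) = true) := by
          simp only [List.all_cons, Bool.and_eq_true, decide_eq_true_eq]
          intro hcon
          exact hr hcon.1
        rw [if_neg hall2, if_pos hall, if_neg hr, dashRun_all rest' hall]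
        try simp
    · have hall2 : ¬ (((r :: rest').all (fun c => decide (c = '-'))) = true) := by
        simp only [List.all_cons, Bool.and_eq_true]
        intro hcon
        exact hall hcon.2
      rw [if_neg hall2, if_neg hall]
  | case4 c rest hc ih =>
    have h2 : safeB (c :: rest) = safeB rest := by
      rw [safeB.eq_def]
      dsimp only
      rw [if_neg hc]
    rw [h2, ih]
    congr 1
    rw [dashRun_cons]
    by_cases hall : rest.all (fun c => decide (c = '-')) = true
    · rw [if_pos hall, if_neg hc, dashRun_all rest hall]
      try simp
    · rw [if_neg hall]

lemma segsY_ne_nil (cs : List Char) : segsY cs ≠ [] := by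
  cases cs with
  | nil => simp [segsY]
  | cons c rest =>
    simp only [segsY]
    split <;> simp

lemma segsY_no_Y (cs : List Char) (h : 'Y' ∉ cs) : segsY cs = [cs] := by
  induction cs with
  | nil => rfl
  | cons c rest ih =>
    simp only [List.mem_cons, not_or] at h
    have hc : ¬ c = 'Y' := fun hh => h.1 hh.symm
    simp [segsY, hc, ih h.2]

lemma segsY_append (s rest : List Char) (h : 'Y' ∉ s) :
    segsY (s ++ 'Y' :: rest) = s :: segsY rest := by
  induction s with
  | nil => simp [segsY]
  | cons c s' ih =>
    simp only [List.mem_cons, not_or] at h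
    have hc : ¬ c = 'Y' := fun hh => h.1 hh.symm
    simp [segsY, hc, ih h.2]

lemma first_split (cs : List Char) (h : 'Y' ∈ cs) :
    ∃ s t, cs = s ++ 'Y' :: t ∧ 'Y' ∉ s := by
  induction cs with
  | nil => simp at h
  | cons c rest ih =>
    by_cases hc : c = 'Y'
    · exact ⟨[], rest, by simp [hc], by simp⟩
    · have h' : 'Y' ∈ rest := by
        rcases List.mem_cons.mp h with h1 | h1
        · exact absurd h1.symm hc
        · exact h1
      rcases ih h' with ⟨s, t, h1, h2⟩
      refine ⟨c :: s, t, by simp [h1], ?_⟩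
      simp only [List.mem_cons, not_or]
      exact ⟨fun hh => hc hh.symm, h2⟩

-- A's result expressed through the segments of the input
def resA (cs : List Char) : List (List String) :=
  if cs = [] then []
  else ((if cs.getLastD ' ' = 'Y' then (segsY cs).dropLast else segsY cs).map Clausula)

lemma getLastD_append_cons {α : Type} (s : List α) (a : α) (t : List α) :
    ∀ d, (s ++ a :: t).getLastD d = t.getLastD a := by
  induction s with
  | nil => intro d; exact List.getLastD_cons
  | cons c s' ih =>
    intro d
    rw [List.cons_append, List.getLastD_cons, ih c]

lemma getLastD_congr {α : Type} (t : List α) (ht : t ≠ []) (d₁ d₂ : α) :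
    t.getLastD d₁ = t.getLastD d₂ := by
  rcases List.exists_cons_of_ne_nil ht with ⟨b, t', rfl⟩
  rw [List.getLastD_cons, List.getLastD_cons]

lemma getLastD_mem (t : List α) (ht : t ≠ []) (d : α) : t.getLastD d ∈ t := by
  rcases List.exists_cons_of_ne_nil ht with ⟨b, t', rfl⟩
  exact List.mem_of_getLast? rfl

lemma resA_noY (cs : List Char) (h0 : cs ≠ []) (h : 'Y' ∉ cs) : resA cs = [Clausula cs] := by
  have hl : cs.getLastD ' ' ≠ 'Y' := fun hY => h (hY ▸ getLastD_mem cs h0 ' ')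
  unfold resA
  rw [if_neg h0, if_neg hl, segsY_no_Y cs h, List.map_cons, List.map_nil]

lemma resA_split (s rest : List Char) (h : 'Y' ∉ s) :
    resA (s ++ 'Y' :: rest) = Clausula s :: resA rest := by
  have hne : s ++ 'Y' :: rest ≠ [] := by simp
  rcases eq_or_ne rest [] with rfl | hrest
  · have hlast : (s ++ 'Y' :: ([] : List Char)).getLastD ' ' = 'Y' :=
      getLastD_append_cons s 'Y' [] ' '
    unfold resA
    rw [if_neg hne, if_pos hlast, segsY_append s [] h]
    rfl
  · have hlast : (s ++ 'Y' :: rest).getLastD ' ' = rest.getLastD ' ' := by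
      rw [getLastD_append_cons s 'Y' rest ' ']
      exact getLastD_congr rest hrest 'Y' ' '
    unfold resA
    rw [if_neg hne, if_neg hrest, hlast, segsY_append s rest h]
    by_cases hY : rest.getLastD ' ' = 'Y'
    · rw [if_pos hY, if_pos hY,
        List.dropLast_cons_of_ne_nil (segsY_ne_nil rest), List.map_cons]
    · rw [if_neg hY, if_neg hY, List.map_cons]

-- ===== A side: fcA computes resA =====
lemma fcA_eq (n : Nat) : ∀ (cs : List Char) (i : Nat) (L : List (List String)),
    2 * cs.length - i ≤ n → i ≤ cs.length → 'Y' ∉ cs.take i → fcA cs i L = L ++ resA cs := by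
  induction n with
  | zero =>
    intro cs i L hm hi _
    have : cs.length = 0 := by omega
    have : cs = [] := List.length_eq_zero_iff.mp this
    subst this
    rw [fcA]
    simp [resA]
  | succ n ih =>
    intro cs i L hm hi hY
    rcases eq_or_ne cs [] with rfl | hne
    · rw [fcA]; simp [resA]
    · rw [fcA, if_neg hne]
      by_cases hge : i ≥ cs.length
      · rw [if_pos hge]
        have hieq : i = cs.length := le_antisymm hi hge
        have : cs.take i = cs := List.take_of_length_le hge
        rw [this] at hY
        rw [resA_noY cs hne hY]
      · rw [if_neg hge]
        replace hge : i < cs.length := lt_of_not_ge hge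
        by_cases hYi : cs.getD i ' ' = 'Y'
        · rw [if_pos hYi]
          have hdecomp : cs = cs.take i ++ 'Y' :: cs.drop (i + 1) := by
            conv_lhs => rw [← List.take_append_drop i cs]
            congr 1
            rw [List.drop_eq_getElem_cons hge]
            congr 1
            rw [List.getD_eq_getElem cs ' ' hge] at hYi
            exact hYi
          rw [ih (cs.drop (i + 1)) 0 (L ++ [Clausula (cs.take i)])
            (by rw [List.length_drop]; omega) (by simp) (by simp)]
          conv_rhs => rw [hdecomp]
          rw [resA_split _ _ hY, List.append_assoc]
          rfl
        · rw [if_neg hYi]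
          apply ih cs (i + 1) L (by omega) (by omega)
          intro hmem
          rw [List.take_succ] at hmem
          rcases List.mem_append.mp hmem with h' | h'
          · exact hY h'
          · rw [List.getElem?_eq_getElem hge] at h'
            simp only [Option.toList_some, List.mem_singleton] at h'
            rw [List.getD_eq_getElem cs ' ' hge] at hYi
            exact hYi h'.symm

-- ===== B side =====
lemma safeB_cons_ne (c : Char) (rest : List Char) (hc : ¬ c = '-') :
    safeB (c :: rest) = safeB rest := by
  rw [safeB.eq_def]
  dsimp only
  rw [if_neg hc]

lemma safeB_dash (r : Char) (rest : List Char) :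
    safeB ('-' :: r :: rest) = safeB rest := by simp [safeB]

lemma safeB_dash_nil : safeB ['-'] = false := by simp [safeB]

-- scanning a safe, 'Y'-free segment appends exactly its Clausula tokens to cur
lemma scanB_seg (n : Nat) : ∀ (s t : List Char) (cur : List String) (res : List (List String)),
    s.length ≤ n → 'Y' ∉ s → safeB s = true →
    scanB (s ++ t) cur res = scanB t (cur ++ Clausula s) res := by
  induction n with
  | zero =>
    intro s t cur res hm _ _
    have : s = [] := List.length_eq_zero_iff.mp (by omega)
    subst this
    simp [Clausula]
  | succ n ih =>
    intro s t cur res hm hY hsafe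
    cases s with
    | nil => simp [Clausula]
    | cons c s' =>
      simp only [List.mem_cons, not_or] at hY
      rw [List.cons_append, scanB]
      rw [if_neg (fun hh => hY.1 hh.symm)]
      by_cases hO : c = 'O'
      · rw [if_pos hO]
        have hc' : ¬ c = '-' := by rw [hO]; decide
        rw [safeB_cons_ne c s' hc'] at hsafe
        rw [ih s' t cur res (by simp at hm; omega) hY.2 hsafe]
        rw [Clausula, if_pos hO]
      · rw [if_neg hO]
        by_cases hD : c = '-'
        · rw [if_pos hD]
          subst hD
          cases s' with
          | nil =>
            exfalso
            rw [safeB_dash_nil] at hsafe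
            simp at hsafe
          | cons r s'' =>
            simp only [List.mem_cons, not_or] at hY
            rw [safeB_dash] at hsafe
            rw [List.cons_append, List.headD_cons, List.drop_one, List.tail_cons]
            rw [ih s'' t (cur ++ [String.mk ['-', r]]) res (by simp at hm; omega) hY.2.2 hsafe]
            rw [Clausula, if_neg hO, if_pos rfl]
            simp
        · rw [if_neg hD]
          rw [safeB_cons_ne c s' hD] at hsafe
          rw [ih s' t (cur ++ [String.mk [c]]) res (by simp at hm; omega) hY.2 hsafe]
          rw [Clausula, if_neg hO, if_neg hD]
          simp

lemma scanB_main (n : Nat) : ∀ (cs : List Char) (res : List (List String)),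
    cs.length ≤ n → (∀ s ∈ segsY cs, safeB s = true) →
    scanB cs [] res = (res ++ ((segsY cs).dropLast.map Clausula),
      Clausula ((segsY cs).getLastD [])) := by
  induction n with
  | zero =>
    intro cs res hm hpre
    have : cs = [] := List.length_eq_zero_iff.mp (by omega)
    subst this
    simp [scanB, segsY, Clausula]
  | succ n ih =>
    intro cs res hm hpre
    by_cases hY : 'Y' ∈ cs
    · rcases first_split cs hY with ⟨s, t, rfl, hs⟩
      have hseg := segsY_append s t hs
      rw [hseg] at hpre
      have hsafe : safeB s = true := hpre s (List.mem_cons_self)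
      have hpre' : ∀ u ∈ segsY t, safeB u = true := fun u hu => hpre u (List.mem_cons_of_mem _ hu)
      rw [scanB_seg s.length s ('Y' :: t) [] res le_rfl hs hsafe]
      rw [scanB, if_pos rfl]
      rw [ih t (res ++ [[] ++ Clausula s]) (by simp at hm ⊢; omega) hpre']
      rw [hseg]
      rw [List.dropLast_cons_of_ne_nil (segsY_ne_nil t), List.map_cons]
      have hlast : (s :: segsY t).getLastD [] = (segsY t).getLastD [] := by
        rcases List.exists_cons_of_ne_nil (segsY_ne_nil t) with ⟨b, t', heq⟩
        rw [heq, List.getLastD_cons, List.getLastD_cons, List.getLastD_cons]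
      rw [hlast]
      simp
    · have hseg := segsY_no_Y cs hY
      have hsafe : safeB cs = true := by
        apply hpre
        rw [hseg]
        exact List.mem_singleton.mpr rfl
      have h1 := scanB_seg cs.length cs [] [] res le_rfl hY hsafe
      rw [List.append_nil] at h1
      rw [h1, scanB, hseg]
      simp

lemma dropLast_append_getLastD {α : Type} (l : List α) (h : l ≠ []) (d : α) :
    l.dropLast ++ [l.getLastD d] = l := by
  rw [List.getLastD_eq_getLast?, List.getLast?_eq_some_getLast (h := h), Option.getD_some]
  exact List.dropLast_append_getLast h

-- ===== VERDICT (by name: the statement is the Claim_ definition above) =====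
theorem formaClausal_spec : Claim_equal_formaClausal := by
  intro A _ hpre
  unfold Spec_formaClausal formaClausal formaClausal_alt
  have hpre' : ∀ s ∈ segsY A.toList, safeB s = true :=
    fun s hs => (safeB_iff_even s).mpr (hpre s hs)
  rw [fcA_eq (2 * A.toList.length) A.toList 0 [] (by omega) (by omega) (by simp),
    List.nil_append]
  show resA A.toList =
    if A.toList ≠ [] ∧ A.toList.getLastD ' ' ≠ 'Y' then
      (scanB A.toList [] []).1 ++ [(scanB A.toList [] []).2]
    else (scanB A.toList [] []).1
  rcases eq_or_ne A.toList [] with hnil | hne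
  · rw [hnil]
    simp [resA, scanB]
  · rw [scanB_main A.toList.length A.toList [] le_rfl hpre', resA, if_neg hne]
    by_cases hlast : A.toList.getLastD ' ' = 'Y'
    · rw [if_pos hlast, if_neg (fun hcon => hcon.2 hlast), List.nil_append]
    · rw [if_neg hlast, if_pos ⟨hne, hlast⟩, List.nil_append]
      show List.map Clausula (segsY A.toList) =
        List.map Clausula (segsY A.toList).dropLast ++ [Clausula ((segsY A.toList).getLastD [])]
      rw [show [Clausula ((segsY A.toList).getLastD [])] =
            List.map Clausula [(segsY A.toList).getLastD []] from rfl,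
        ← List.map_append, dropLast_append_getLastD _ (segsY_ne_nil A.toList)]
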